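-- pv_equiv track=rewrite | github.com/morehosseini/teaching-tools | agent-pm/app/pages/page_04_schedule.py | _split_specs
-- ===== SOURCE A (Python) =====
-- def _split_specs(specs, split_map):
--     last_id = {source_id: parts[-1][0] for source_id, parts in split_map.items()}
--     part_to_source = {
--         part_id: source_id
--         for source_id, parts in split_map.items()
--         for part_id, _, _ in parts
--     }
--     expanded = []
--
--     for spec in specs:
--         activity_id, wbs_code, wbs_name, name, activity_type, duration, trade, predecessors = spec
--         if activity_id not in split_map:
--             expanded.append(spec)
--             continue
--
--         prior_id = None
--         for idx, (part_id, part_name, part_duration) in enumerate(split_map[activity_id]):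
--             part_predecessors = predecessors if idx == 0 else [prior_id]
--             expanded.append((
--                 part_id,
--                 wbs_code,
--                 wbs_name,
--                 part_name,
--                 activity_type,
--                 part_duration,
--                 trade,
--                 part_predecessors,
--             ))
--             prior_id = part_id
--
--     rewired = []
--     for spec in expanded:
--         activity_id, wbs_code, wbs_name, name, activity_type, duration, trade, predecessors = spec
--         source_id = part_to_source.get(activity_id)
--         part_ids_for_source = {
--             part_id for part_id, _, _ in split_map.get(source_id, [])
--         } if source_id else set()
--         rewired.append((
--             activity_id,
--             wbs_code,
--             wbs_name,
--             name,
--             activity_type,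
--             duration,
--             trade,
--             [
--                 pred if pred in part_ids_for_source else last_id.get(pred, pred)
--                 for pred in predecessors
--             ],
--         ))
--     return rewired
-- ===== SOURCE B (Python) =====
-- def _split_specs(specs, split_map):
--     # Single pass: precompute last-part ids, part->source and per-source part-id
--     # sets once, then emit rows with predecessors remapped on the fly.
--     last_id = {s: parts[-1][0] for s, parts in split_map.items()}
--     part_to_source = {pid: s for s, parts in split_map.items() for pid, _, _ in parts}
--     part_sets = {s: {pid for pid, _, _ in parts} for s, parts in split_map.items()}
--
--     def remap(act_id, preds):
--         s = part_to_source.get(act_id)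
--         pids = part_sets[s] if s else set()
--         return [p if p in pids else last_id.get(p, p) for p in preds]
--
--     out = []
--     for aid, wbs_code, wbs_name, name, atype, dur, trade, preds in specs:
--         parts = split_map.get(aid)
--         if parts is None:
--             out.append((aid, wbs_code, wbs_name, name, atype, dur, trade,
--                         remap(aid, preds)))
--             continue
--         prior = None
--         for pid, pname, pdur in parts:
--             preds_i = preds if prior is None else [prior]
--             out.append((pid, wbs_code, wbs_name, pname, atype, pdur, trade,
--                         remap(pid, preds_i)))
--             prior = pid
--     return out
-- ===== Notes on version B (the rewrite author's own statement) =====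
-- stated objective: simpler
-- what changed: Collapses A's expand-then-rewire two-pass structure (intermediate 'expanded' list, per-row recomputation of the sibling part-id set) into a single pass over specs that emits rows with predecessors remapped on the fly, using per-source part-id sets precomputed once.
import Mathlib
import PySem

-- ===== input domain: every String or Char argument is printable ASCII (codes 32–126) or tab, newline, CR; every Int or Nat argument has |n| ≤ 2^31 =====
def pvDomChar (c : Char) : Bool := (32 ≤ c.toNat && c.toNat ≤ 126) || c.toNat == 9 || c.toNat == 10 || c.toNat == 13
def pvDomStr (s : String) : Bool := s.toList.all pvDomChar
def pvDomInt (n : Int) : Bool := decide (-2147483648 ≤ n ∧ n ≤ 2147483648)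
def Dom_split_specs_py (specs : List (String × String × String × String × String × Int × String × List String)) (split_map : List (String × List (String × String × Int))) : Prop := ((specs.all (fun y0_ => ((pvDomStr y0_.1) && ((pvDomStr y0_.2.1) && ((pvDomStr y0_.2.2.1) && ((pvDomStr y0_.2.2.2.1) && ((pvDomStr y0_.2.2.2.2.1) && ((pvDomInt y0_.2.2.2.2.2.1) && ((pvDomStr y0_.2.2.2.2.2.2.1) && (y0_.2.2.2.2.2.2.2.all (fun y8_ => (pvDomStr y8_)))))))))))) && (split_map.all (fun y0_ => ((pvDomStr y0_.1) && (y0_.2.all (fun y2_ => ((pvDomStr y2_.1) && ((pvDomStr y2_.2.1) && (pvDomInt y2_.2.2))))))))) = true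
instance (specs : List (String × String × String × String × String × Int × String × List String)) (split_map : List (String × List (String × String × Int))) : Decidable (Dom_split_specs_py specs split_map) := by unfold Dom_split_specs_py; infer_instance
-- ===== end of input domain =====

-- B fuses A's expand-then-rewire two passes into a single pass with the per-source
-- part-id sets precomputed once (objective: simpler; same asymptotic cost).

abbrev pvSpec : Type := String × String × String × String × String × Int × String × List String
abbrev pvParts : Type := List (String × String × Int)

-- shared by both ports: the dict parameter and the two dict comprehensions that are
-- textually identical in Source A and Source B (last_id, part_to_source)
def pvSM (split_map : List (String × pvParts)) : PySem.Dict String pvParts :=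
  PySem.Dict.ofList split_map

def pvLastId (split_map : List (String × pvParts)) : PySem.Dict String String :=
  (pvSM split_map).items.foldl
    (fun d p => d.insert p.1 (PySem.List.pyGetD p.2 (-1) ("", "", 0)).1) PySem.Dict.empty

def pvPartToSource (split_map : List (String × pvParts)) : PySem.Dict String String :=
  (pvSM split_map).items.foldl
    (fun d p => p.2.foldl (fun d q => d.insert q.1 p.1) d) PySem.Dict.empty

-- ===== PORT A =====
def split_specs_py (specs : List (String × String × String × String × String × Int × String × List String)) (split_map : List (String × List (String × String × Int))) : List (String × String × String × String × String × Int × String × List String) :=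
  let sm := pvSM split_map
  let last_id := pvLastId split_map
  let pts := pvPartToSource split_map
  let expanded : List pvSpec :=
    specs.foldl (fun exp spec =>
      match spec with
      | (aid, wc, wn, _nm, at_, _du, tr, preds) =>
        if sm.contains aid = false then exp ++ [spec]
        else
          ((PySem.List.enumerate (sm.getD aid [])).foldl
            (fun (st : List pvSpec × Option String) ip =>
              (st.1 ++ [(ip.2.1, wc, wn, ip.2.2.1, at_, ip.2.2.2, tr,
                 if ip.1 = 0 then preds else [st.2.getD ""])], some ip.2.1))
            (exp, none)).1) []
  expanded.foldl (fun rw spec =>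
    match spec with
    | (aid, wc, wn, nm, at_, du, tr, preds) =>
      let pids : PySem.Set String :=
        match pts.get? aid with
        | some s => if s = "" then PySem.Set.empty
                    else PySem.Set.ofList ((sm.getD s []).map (·.1))
        | none => PySem.Set.empty
      rw ++ [(aid, wc, wn, nm, at_, du, tr,
        preds.map (fun p => if PySem.Set.contains pids p then p else last_id.getD p p))]) []

-- ===== PORT B =====
-- B-only helpers: the per-source part-id sets, computed once, and Source B's remap
def pvPartSets (split_map : List (String × pvParts)) : PySem.Dict String (PySem.Set String) :=
  (pvSM split_map).items.foldl
    (fun d p => d.insert p.1 (PySem.Set.ofList (p.2.map (·.1)))) PySem.Dict.empty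

def pvRemap (split_map : List (String × pvParts)) (aid : String) (preds : List String) : List String :=
  let pids : PySem.Set String :=
    match (pvPartToSource split_map).get? aid with
    | some s => if s = "" then PySem.Set.empty
                else (pvPartSets split_map).getD s PySem.Set.empty
    | none => PySem.Set.empty
  preds.map (fun p => if PySem.Set.contains pids p then p else (pvLastId split_map).getD p p)

def split_specs_py_alt (specs : List (String × String × String × String × String × Int × String × List String)) (split_map : List (String × List (String × String × Int))) : List (String × String × String × String × String × Int × String × List String) :=
  let sm := pvSM split_map
  specs.foldl (fun out spec =>
    match spec with
    | (aid, wc, wn, nm, at_, du, tr, preds) =>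
      match sm.get? aid with
      | none => out ++ [(aid, wc, wn, nm, at_, du, tr, pvRemap split_map aid preds)]
      | some parts =>
        (parts.foldl (fun (st : List pvSpec × Option String) q =>
          (st.1 ++ [(q.1, wc, wn, q.2.1, at_, q.2.2, tr,
             pvRemap split_map q.1 (match st.2 with | none => preds | some pr => [pr]))],
           some q.1))
          (out, none)).1) []

-- ===== PRECONDITION & SPEC =====
-- Pre_ excludes split_map entries with an empty parts list: there A raises IndexError
-- on parts[-1] (and B raises the same way); nothing else is excluded.
def Pre_split_specs_py (specs : List (String × String × String × String × String × Int × String × List String)) (split_map : List (String × List (String × String × Int))) : Prop :=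
  ∀ p ∈ split_map, p.2 ≠ []
instance (specs : List (String × String × String × String × String × Int × String × List String)) (split_map : List (String × List (String × String × Int))) : Decidable (Pre_split_specs_py specs split_map) := by unfold Pre_split_specs_py; infer_instance

def pvWitness_split_specs_py : (List (String × String × String × String × String × Int × String × List String)) × (List (String × List (String × String × Int))) :=
  ([("A", "1", "W", "Act", "task", 5, "tr", ["P"]), ("P", "1", "W", "Pre", "task", 2, "tr", [])],
   [("A", [("A1", "part1", 2), ("A2", "part2", 3)])])

def Spec_split_specs_py (specs : List (String × String × String × String × String × Int × String × List String)) (split_map : List (String × List (String × String × Int))) (out : List (String × String × String × String × String × Int × String × List String)) : Prop := out = split_specs_py_alt specs split_map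
instance (specs : List (String × String × String × String × String × Int × String × List String)) (split_map : List (String × List (String × String × Int))) (out : List (String × String × String × String × String × Int × String × List String)) : Decidable (Spec_split_specs_py specs split_map out) := by
  unfold Spec_split_specs_py
  haveI : DecidableEq (Int × String × List String) := inferInstance
  haveI : DecidableEq (String × Int × String × List String) := inferInstance
  haveI : DecidableEq (String × String × Int × String × List String) := inferInstance
  haveI : DecidableEq (String × String × String × Int × String × List String) := inferInstance
  haveI : DecidableEq (String × String × String × String × Int × String × List String) := inferInstance
  haveI : DecidableEq (String × String × String × String × String × Int × String × List String) := inferInstance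
  exact List.hasDecEq _ _

-- ===== CLAIM (what is proved, stated in full; the proofs are below) =====
def Claim_equal_split_specs_py : Prop := ∀ (specs : List (String × String × String × String × String × Int × String × List String)) (split_map : List (String × List (String × String × Int))), Dom_split_specs_py specs split_map → Pre_split_specs_py specs split_map → Spec_split_specs_py specs split_map (split_specs_py specs split_map)

-- ===== LEMMAS AND PROOFS =====

def pvRemapA (split_map : List (String × pvParts)) (aid : String) (preds : List String) : List String :=
  let pids : PySem.Set String :=
    match (pvPartToSource split_map).get? aid with
    | some s => if s = "" then PySem.Set.empty
                else PySem.Set.ofList (((pvSM split_map).getD s []).map (·.1))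
    | none => PySem.Set.empty
  preds.map (fun p => if PySem.Set.contains pids p then p else (pvLastId split_map).getD p p)

def pvRW (split_map : List (String × pvParts)) : pvSpec → pvSpec := fun spec =>
  match spec with
  | (aid, wc, wn, nm, at_, du, tr, preds) =>
    (aid, wc, wn, nm, at_, du, tr, pvRemapA split_map aid preds)

def pvTail (wc wn at_ tr pr : String) : pvParts → List pvSpec
  | [] => []
  | q :: rest => (q.1, wc, wn, q.2.1, at_, q.2.2, tr, [pr]) :: pvTail wc wn at_ tr q.1 rest

def pvExpandOne (split_map : List (String × pvParts)) (spec : pvSpec) : List pvSpec :=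
  match spec with
  | (aid, wc, wn, _nm, at_, _du, tr, preds) =>
    match (pvSM split_map).get? aid with
    | none => [spec]
    | some [] => []
    | some (q :: rest) =>
      (q.1, wc, wn, q.2.1, at_, q.2.2, tr, preds) :: pvTail wc wn at_ tr q.1 rest

-- named step functions, definitionally equal to the ports' inline loop bodies
def pvInA (wc wn at_ tr : String) (preds : List String)
    (st : List pvSpec × Option String) (ip : Int × (String × String × Int)) :
    List pvSpec × Option String :=
  (st.1 ++ [(ip.2.1, wc, wn, ip.2.2.1, at_, ip.2.2.2, tr,
     if ip.1 = 0 then preds else [st.2.getD ""])], some ip.2.1)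

def pvStepA (m : List (String × pvParts)) (exp : List pvSpec) (spec : pvSpec) : List pvSpec :=
  match spec with
  | (aid, wc, wn, _nm, at_, _du, tr, preds) =>
    if (pvSM m).contains aid = false then exp ++ [spec]
    else ((PySem.List.enumerate ((pvSM m).getD aid [])).foldl (pvInA wc wn at_ tr preds) (exp, none)).1

def pvStepRW (m : List (String × pvParts)) (rw : List pvSpec) (spec : pvSpec) : List pvSpec :=
  match spec with
  | (aid, wc, wn, nm, at_, du, tr, preds) =>
    let pids : PySem.Set String :=
      match (pvPartToSource m).get? aid with
      | some s => if s = "" then PySem.Set.empty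
                  else PySem.Set.ofList (((pvSM m).getD s []).map (·.1))
      | none => PySem.Set.empty
    rw ++ [(aid, wc, wn, nm, at_, du, tr,
      preds.map (fun p => if PySem.Set.contains pids p then p else (pvLastId m).getD p p))]

def pvInB (m : List (String × pvParts)) (wc wn at_ tr : String) (preds : List String)
    (st : List pvSpec × Option String) (q : String × String × Int) :
    List pvSpec × Option String :=
  (st.1 ++ [(q.1, wc, wn, q.2.1, at_, q.2.2, tr,
     pvRemap m q.1 (match st.2 with | none => preds | some pr => [pr]))], some q.1)

def pvStepB (m : List (String × pvParts)) (out : List pvSpec) (spec : pvSpec) : List pvSpec :=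
  match spec with
  | (aid, wc, wn, nm, at_, du, tr, preds) =>
    match (pvSM m).get? aid with
    | none => out ++ [(aid, wc, wn, nm, at_, du, tr, pvRemap m aid preds)]
    | some parts => (parts.foldl (pvInB m wc wn at_ tr preds) (out, none)).1

theorem pvA_bridge (specs : List pvSpec) (m : List (String × pvParts)) :
    split_specs_py specs m = (specs.foldl (pvStepA m) []).foldl (pvStepRW m) [] := rfl

theorem pvB_bridge (specs : List pvSpec) (m : List (String × pvParts)) :
    split_specs_py_alt specs m = specs.foldl (pvStepB m) [] := rfl

theorem pvPartSets_getD (m : List (String × pvParts)) (s : String) :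
    (pvPartSets m).getD s PySem.Set.empty
      = PySem.Set.ofList (((pvSM m).getD s []).map (·.1)) := by
  have hk : ((pvSM m).items.map Prod.fst).Nodup := by
    have := PySem.Dict.nodup_keys_ofList (κ := String) (ν := pvParts) m
    simpa [PySem.Dict.keys, pvSM] using this
  have hitems := PySem.Dict.items_foldl_insert_fresh ((pvSM m).items) Prod.fst
      (fun p => PySem.Set.ofList (p.2.map (·.1))) PySem.Dict.empty (by simp) hk
  have hnd : (pvPartSets m).keys.Nodup := by
    unfold pvPartSets
    exact PySem.Dict.nodup_keys_foldl_insert_key _ _ _ _ (by simp [PySem.Dict.empty, PySem.Dict.keys])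
  cases hc : (pvSM m).get? s with
  | some parts =>
      have hmem : (s, parts) ∈ (pvSM m).items := PySem.Dict.mem_items_of_get?_eq_some _ hc
      have hmem2 : (s, PySem.Set.ofList (parts.map (·.1))) ∈ (pvPartSets m).items := by
        unfold pvPartSets
        rw [hitems]
        exact List.mem_append_right _ (List.mem_map.mpr ⟨(s, parts), hmem, rfl⟩)
      rw [PySem.Dict.getD_of_mem_items _ hmem2 hnd]
      rw [PySem.Dict.getD_eq_get?_getD, hc]
      rfl
  | none =>
      have hnk : s ∉ (pvSM m).keys := (PySem.Dict.get?_eq_none_iff_not_mem_keys _ _).mp hc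
      have hcont : (pvPartSets m).contains s = false := by
        rw [PySem.Dict.contains_eq_decide_mem_keys]
        unfold pvPartSets
        rw [PySem.Dict.keys_foldl_insert_key]
        simp only [decide_eq_false_iff_not]
        intro hmem
        apply hnk
        have h2 : s ∈ ((pvSM m).items.map Prod.fst) := by
          simpa [PySem.Dict.empty, PySem.Dict.keys, PySem.Set.mem_update] using hmem
        simpa [PySem.Dict.keys] using h2
      rw [PySem.Dict.getD_of_not_contains _ _ hcont]
      rw [PySem.Dict.getD_eq_get?_getD, hc]
      rfl

theorem pvRemap_eq (m : List (String × pvParts)) (aid : String) (preds : List String) :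
    pvRemap m aid preds = pvRemapA m aid preds := by
  unfold pvRemap pvRemapA
  cases (pvPartToSource m).get? aid with
  | none => rfl
  | some s =>
      by_cases h : s = ""
      · simp [h]
      · simp only [h, if_false, pvPartSets_getD]

-- A's inner enumerate-fold, after the first element
theorem pvA_inner (wc wn at_ tr : String) (preds : List String) :
    ∀ (rest : pvParts) (k : Int), 0 < k → ∀ (exp : List pvSpec) (pr : String),
    ((PySem.List.enumerate rest k).foldl (pvInA wc wn at_ tr preds) (exp, some pr)).1
      = exp ++ pvTail wc wn at_ tr pr rest := by
  intro rest
  induction rest with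
  | nil => intro k hk exp pr; simp [PySem.List.enumerate, pvTail]
  | cons q rest ih =>
      intro k hk exp pr
      rw [PySem.List.enumerate_cons]
      simp only [List.foldl_cons, pvInA]
      have hne : ¬ (k = 0) := by omega
      simp only [hne, if_false, Option.getD_some]
      rw [ih (k + 1) (by omega)]
      simp [pvTail]

-- A's inner fold from the start
theorem pvA_inner0 (wc wn at_ tr : String) (preds : List String)
    (parts : pvParts) (exp : List pvSpec) :
    ((PySem.List.enumerate parts 0).foldl (pvInA wc wn at_ tr preds) (exp, none)).1
    = exp ++ (match parts with
              | [] => []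
              | q :: rest => (q.1, wc, wn, q.2.1, at_, q.2.2, tr, preds) :: pvTail wc wn at_ tr q.1 rest) := by
  cases parts with
  | nil => simp [PySem.List.enumerate]
  | cons q rest =>
      rw [PySem.List.enumerate_cons]
      simp only [List.foldl_cons, pvInA, reduceIte, zero_add]
      rw [pvA_inner wc wn at_ tr preds rest 1 (by omega)]
      simp

-- B's inner fold, after the first element
theorem pvB_inner (m : List (String × pvParts)) (wc wn at_ tr : String) (preds : List String) :
    ∀ (rest : pvParts) (out : List pvSpec) (pr : String),
    ((rest.foldl (pvInB m wc wn at_ tr preds) (out, some pr)).1)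
    = out ++ (pvTail wc wn at_ tr pr rest).map (pvRW m) := by
  intro rest
  induction rest with
  | nil => intro out pr; simp [pvTail]
  | cons q rest ih =>
      intro out pr
      simp only [List.foldl_cons, pvInB]
      rw [ih]
      simp [pvTail, pvRW, pvRemap_eq]

-- per-spec step of A's first pass
theorem pvA_step (m : List (String × pvParts)) (exp : List pvSpec) (spec : pvSpec) :
    pvStepA m exp spec = exp ++ pvExpandOne m spec := by
  obtain ⟨aid, wc, wn, nm, at_, du, tr, preds⟩ := spec
  unfold pvStepA
  cases hc : (pvSM m).get? aid with
  | none =>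
      have hcont : (pvSM m).contains aid = false := by
        rw [PySem.Dict.contains_eq_isSome_get?, hc]; rfl
      simp [hcont, pvExpandOne, hc]
  | some parts =>
      have hcont : (pvSM m).contains aid = true := by
        rw [PySem.Dict.contains_eq_isSome_get?, hc]; rfl
      have hgd : (pvSM m).getD aid [] = parts := by
        rw [PySem.Dict.getD_eq_get?_getD, hc]; rfl
      simp only [hcont, Bool.true_eq_false, if_false, hgd]
      rw [pvA_inner0 wc wn at_ tr preds parts exp]
      cases parts with
      | nil => simp [pvExpandOne, hc]
      | cons q rest => simp [pvExpandOne, hc]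

-- per-spec step of B's single pass
theorem pvB_step (m : List (String × pvParts)) (out : List pvSpec) (spec : pvSpec) :
    pvStepB m out spec = out ++ (pvExpandOne m spec).map (pvRW m) := by
  obtain ⟨aid, wc, wn, nm, at_, du, tr, preds⟩ := spec
  unfold pvStepB
  cases hc : (pvSM m).get? aid with
  | none => simp [pvExpandOne, hc, pvRW, pvRemap_eq]
  | some parts =>
      cases parts with
      | nil => simp [pvExpandOne, hc]
      | cons q rest =>
          simp only [hc, List.foldl_cons, pvInB]
          rw [pvB_inner m wc wn at_ tr preds rest]
          simp [pvExpandOne, hc, pvRW, pvRemap_eq]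

theorem pvA_fold (m : List (String × pvParts)) :
    ∀ (l : List pvSpec) (exp : List pvSpec),
    l.foldl (pvStepA m) exp = exp ++ l.flatMap (pvExpandOne m) := by
  intro l
  induction l with
  | nil => intro exp; simp
  | cons sp l ih =>
      intro exp
      simp only [List.foldl_cons]
      rw [ih, pvA_step]
      simp [List.flatMap_cons, List.append_assoc]

theorem pvRW_fold (m : List (String × pvParts)) (l : List pvSpec) :
    l.foldl (pvStepRW m) [] = l.map (pvRW m) := by
  have hfun : pvStepRW m = fun rw spec => rw ++ [pvRW m spec] := by
    funext rw spec
    obtain ⟨aid, wc, wn, nm, at_, du, tr, preds⟩ := spec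
    rfl
  rw [hfun, PySem.List.foldl_append_singleton_eq_map]
  simp

theorem pvA_eq (specs : List pvSpec) (m : List (String × pvParts)) :
    split_specs_py specs m = (specs.flatMap (pvExpandOne m)).map (pvRW m) := by
  rw [pvA_bridge, pvA_fold, pvRW_fold]
  simp

theorem pvB_eq (specs : List pvSpec) (m : List (String × pvParts)) :
    split_specs_py_alt specs m = specs.flatMap (fun sp => (pvExpandOne m sp).map (pvRW m)) := by
  rw [pvB_bridge]
  have h : ∀ (l : List pvSpec) (out : List pvSpec),
      l.foldl (pvStepB m) out = out ++ l.flatMap (fun sp => (pvExpandOne m sp).map (pvRW m)) := by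
    intro l
    induction l with
    | nil => intro out; simp
    | cons sp l ih =>
        intro out
        simp only [List.foldl_cons]
        rw [ih, pvB_step]
        simp [List.flatMap_cons, List.append_assoc]
  rw [h specs []]
  simp


-- ===== VERDICT (by name: the statement is the Claim_ definition above) =====
theorem split_specs_py_spec : Claim_equal_split_specs_py := by
  intro specs split_map _ _
  unfold Spec_split_specs_py
  rw [pvA_eq, pvB_eq, List.map_flatMap]
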